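-- pv_equiv track=rewrite | github.com/Eirik-MS/NTNU_Code | MX_TTM4135/01_PA/jonasVig.py | join_streams
-- ===== SOURCE A (Python) =====
-- def join_streams(streams):
--     output = ""
--     max_len = max(map(lambda a: len(a), streams))
--     for i in range(max_len):
--         for o in range(len(streams)):
--             if len(streams[o]) <= i:
--                 continue
--             output += streams[o][i]
--
--     return output
-- ===== SOURCE B (Python) =====
-- def join_streams(streams):
--     bufs = [list(s) for s in streams]
--     parts = []
--     while any(bufs):
--         parts.append(''.join(b[0] for b in bufs if b))
--         bufs = [b[1:] for b in bufs]
--     return ''.join(parts)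
-- ===== Notes on version B (the rewrite author's own statement) =====
-- stated objective: alternative
-- what changed: Replaces the index-by-position nested loop with max()/len-guards by a transposed head/tail peeling: repeatedly emit the first character of every nonempty stream and drop it, until all streams are exhausted.
import Mathlib
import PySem

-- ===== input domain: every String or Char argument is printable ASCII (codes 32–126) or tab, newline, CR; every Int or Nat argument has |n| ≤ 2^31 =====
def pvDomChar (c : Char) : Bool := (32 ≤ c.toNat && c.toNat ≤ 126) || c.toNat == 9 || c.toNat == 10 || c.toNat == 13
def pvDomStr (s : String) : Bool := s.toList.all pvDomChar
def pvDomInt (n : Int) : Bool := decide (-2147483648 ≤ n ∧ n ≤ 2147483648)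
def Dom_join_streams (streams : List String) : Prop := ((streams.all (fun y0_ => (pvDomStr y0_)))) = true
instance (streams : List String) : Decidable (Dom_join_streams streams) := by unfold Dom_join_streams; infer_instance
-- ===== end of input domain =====

-- B replaces A's index-by-position nested loop (max length, per-cell bound check)
-- by head/tail peeling of the streams; same return value on every nonempty input.


-- ===== PORT A =====
def join_streams (streams : List String) : String :=
  -- max(map(lambda a: len(a), streams)); the 'none' branch is Python's ValueError, excluded by Pre_
  match PySem.List.max? (streams.map (fun a => PySem.Str.len a)) id with
  | none => ""
  | some max_len =>
    String.ofList <|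
      (PySem.List.pyRange 0 max_len).foldl (fun output i =>
        (PySem.List.pyRange 0 (streams.length : Int)).foldl (fun output o =>
          -- streams[o] via pyGetD (o ∈ range(len(streams)) so in range); s[i] guarded in range
          if PySem.Str.len (PySem.List.pyGetD streams o "") ≤ i then output
          else output ++ [PySem.List.pyGetD (PySem.List.pyGetD streams o "").toList i ' ']) output) []

-- ===== PORT B =====
-- the while-loop of Source B; fuel = total number of characters bounds the number of iterations
def pvRows : Nat → List (List Char) → List Char
  | 0, _ => []
  | fuel + 1, bufs =>
    if bufs.any (fun b => !b.isEmpty) then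
      (bufs.filterMap List.head?) ++ pvRows fuel (bufs.map List.tail)
    else []

def join_streams_alt (streams : List String) : String :=
  let bufs := streams.map String.toList
  String.ofList (pvRows ((bufs.map List.length).sum) bufs)

-- ===== PRECONDITION & SPEC =====
-- Pre_ excludes only the empty streams list, on which Python A raises ValueError (max() of an empty sequence)
def Pre_join_streams (streams : List String) : Prop := streams ≠ []
instance (streams : List String) : Decidable (Pre_join_streams streams) := by unfold Pre_join_streams; infer_instance
def pvWitness_join_streams : List String := ["ab", "c"]

def Spec_join_streams (streams : List String) (out : String) : Prop := out = join_streams_alt streams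
instance (streams : List String) (out : String) : Decidable (Spec_join_streams streams out) := by unfold Spec_join_streams; infer_instance

-- ===== CLAIM (what is proved, stated in full; the proofs are below) =====
def Claim_equal_join_streams : Prop := ∀ (streams : List String), Dom_join_streams streams → Pre_join_streams streams → Spec_join_streams streams (join_streams streams)

-- ===== LEMMAS AND PROOFS =====

-- the characters A collects at row index k
def pvRow (L : List (List Char)) (k : Nat) : List Char :=
  L.flatMap (fun s => if s.length ≤ k then [] else [s.getD k ' '])

lemma pvRow_zero (L : List (List Char)) : pvRow L 0 = L.filterMap List.head? := by
  induction L with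
  | nil => rfl
  | cons s L ih => cases s <;> simp [pvRow, List.flatMap_cons] at ih ⊢ <;> exact ih

lemma pvRow_succ (L : List (List Char)) (k : Nat) :
    pvRow L (k + 1) = pvRow (L.map List.tail) k := by
  induction L with
  | nil => rfl
  | cons s L ih =>
    cases s with
    | nil =>
      rw [pvRow, pvRow, List.map_cons, List.flatMap_cons, List.flatMap_cons, List.tail_nil,
          ← pvRow, ← pvRow, ih]
      simp
    | cons c cs =>
      have hh : (if (c :: cs).length ≤ k + 1 then ([] : List Char)
            else [(c :: cs).getD (k + 1) ' ']) = if cs.length ≤ k then [] else [cs.getD k ' '] := by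
        simp
      rw [pvRow, pvRow, List.map_cons, List.flatMap_cons, List.flatMap_cons, List.tail_cons,
          ← pvRow, ← pvRow, ih, hh]

lemma pvRows_eq (n : Nat) : ∀ (fuel : Nat) (L : List (List Char)),
    (∀ s ∈ L, s.length ≤ n) → (∀ s ∈ L, s.length ≤ fuel) →
    pvRows fuel L = (List.range n).flatMap (pvRow L) := by
  induction n with
  | zero =>
    intro fuel L hn _
    have hall : L.any (fun b => !b.isEmpty) = false := by
      simp only [List.any_eq_false]
      intro s hs
      have := hn s hs
      simp [List.length_eq_zero_iff.mp (Nat.le_zero.mp this)]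
    cases fuel <;> simp [pvRows, hall]
  | succ n ih =>
    intro fuel L hn hf
    by_cases hA : L.any (fun b => !b.isEmpty) = true
    · obtain ⟨s, hs, hne⟩ := List.any_eq_true.mp hA
      have hslen : 1 ≤ s.length := by
        cases s with
        | nil => simp at hne
        | cons _ _ => simp
      cases fuel with
      | zero => exact absurd (hf s hs) (by omega)
      | succ f =>
        have htail : ∀ t ∈ L.map List.tail, t.length ≤ n := by
          intro t ht
          obtain ⟨u, hu, rfl⟩ := List.mem_map.mp ht
          have h1 := hn u hu
          have h2 : u.tail.length = u.length - 1 := List.length_tail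
          omega
        have htailf : ∀ t ∈ L.map List.tail, t.length ≤ f := by
          intro t ht
          obtain ⟨u, hu, rfl⟩ := List.mem_map.mp ht
          have h1 := hf u hu
          have h2 : u.tail.length = u.length - 1 := List.length_tail
          omega
        rw [pvRows, if_pos hA, ih f _ htail htailf, List.range_succ_eq_map,
            List.flatMap_cons, pvRow_zero]
        congr 1
        rw [List.flatMap_map]
        exact List.flatMap_congr (by intro k _; exact (pvRow_succ L k).symm)
    · have hall : L.any (fun b => !b.isEmpty) = false := by
        simpa using hA
      have : ∀ k, pvRow L k = [] := by
        intro k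
        simp only [pvRow, List.flatMap_eq_nil_iff]
        intro s hs
        have : s.length = 0 := by
          have := List.any_eq_false.mp hall s hs
          simpa [List.isEmpty_iff, List.length_eq_zero_iff] using this
        simp [this]
      cases fuel <;> simp [pvRows, hall, this]

-- A's per-row characters, with the Python Int index
def pvRowI (streams : List String) (i : Int) : List Char :=
  streams.flatMap (fun s => if PySem.Str.len s ≤ i then [] else [PySem.List.pyGetD s.toList i ' '])

lemma pvInner_eq (streams : List String) (i : Int) (out : List Char) :
    (PySem.List.pyRange 0 (streams.length : Int)).foldl (fun output o =>
      if PySem.Str.len (PySem.List.pyGetD streams o "") ≤ i then output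
      else output ++ [PySem.List.pyGetD (PySem.List.pyGetD streams o "").toList i ' ']) out
    = out ++ pvRowI streams i := by
  rw [PySem.List.foldl_pyRange_zero_pyGetD' streams ""
    (fun output s => if PySem.Str.len s ≤ i then output
      else output ++ [PySem.List.pyGetD s.toList i ' ']) out]
  induction streams generalizing out with
  | nil => simp [pvRowI]
  | cons s L ih =>
    have hc : pvRowI (s :: L) i
        = (if PySem.Str.len s ≤ i then [] else [PySem.List.pyGetD s.toList i ' ']) ++ pvRowI L i := by
      rw [pvRowI, pvRowI, List.flatMap_cons]
    rw [List.foldl_cons, ih, hc]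
    split_ifs <;> simp

lemma pvOuter_eq (streams : List String) (l : List Int) (out : List Char) :
    l.foldl (fun output i =>
      (PySem.List.pyRange 0 (streams.length : Int)).foldl (fun output o =>
        if PySem.Str.len (PySem.List.pyGetD streams o "") ≤ i then output
        else output ++ [PySem.List.pyGetD (PySem.List.pyGetD streams o "").toList i ' ']) output) out
    = out ++ l.flatMap (pvRowI streams) := by
  induction l generalizing out with
  | nil => simp
  | cons i l ih => rw [List.foldl_cons, ih, pvInner_eq, List.flatMap_cons, List.append_assoc]

lemma pvRowI_cast (streams : List String) (k : Nat) :
    pvRowI streams (k : Int) = pvRow (streams.map String.toList) k := by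
  rw [pvRowI, pvRow, List.flatMap_map]
  refine List.flatMap_congr ?_
  intro s _
  simp [PySem.Str.len_eq, PySem.List.pyGetD_natCast]

lemma pvMax?_isSome {α κ : Type} [LT κ] [DecidableLT κ] (xs : List α) (key : α → κ)
    (h : xs ≠ []) : (PySem.List.max? xs key).isSome := by
  cases xs with
  | nil => exact absurd rfl h
  | cons x xs =>
    suffices hgen : ∀ (l : List α) (m : α),
        (l.foldl (fun acc y =>
          match acc with
          | none => some y
          | some m => if key m < key y then some y else some m) (some m)).isSome by
      simpa [PySem.List.max?] using hgen xs x
    intro l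
    induction l with
    | nil => intro m; rfl
    | cons y l ih => intro m; by_cases h : key m < key y <;> simp [List.foldl_cons, h, ih]

-- ===== VERDICT (by name: the statement is the Claim_ definition above) =====
theorem join_streams_spec : Claim_equal_join_streams := by
  intro streams _ hpre
  unfold Spec_join_streams
  have hmap : streams.map (fun a => PySem.Str.len a) ≠ [] := by
    simpa using hpre
  obtain ⟨m, hm⟩ := Option.isSome_iff_exists.mp (pvMax?_isSome _ id hmap)
  have hmem := PySem.List.max?_mem hm
  obtain ⟨s0, _, hs0⟩ := List.mem_map.mp hmem
  have h0 : 0 ≤ m := by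
    rw [← hs0, PySem.Str.len_eq]; positivity
  have hb : ∀ s ∈ streams, PySem.Str.len s ≤ m := by
    intro s hs
    exact PySem.List.max?_isMax hm _ (List.mem_map_of_mem hs)
  rw [join_streams.eq_def, hm]
  show String.ofList
      ((PySem.List.pyRange 0 m).foldl (fun output i =>
        (PySem.List.pyRange 0 (streams.length : Int)).foldl (fun output o =>
          if PySem.Str.len (PySem.List.pyGetD streams o "") ≤ i then output
          else output ++ [PySem.List.pyGetD (PySem.List.pyGetD streams o "").toList i ' ']) output) [])
    = join_streams_alt streams
  rw [pvOuter_eq, List.nil_append, PySem.List.pyRange_one, List.flatMap_map]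
  have hcast : ∀ k ∈ List.range (m - 0).toNat,
      pvRowI streams (0 + (k : Int)) = pvRow (streams.map String.toList) k := by
    intro k _
    rw [zero_add, pvRowI_cast]
  rw [List.flatMap_congr hcast]
  rw [join_streams_alt]
  congr 1
  refine (pvRows_eq (m - 0).toNat _ _ ?_ ?_).symm
  · intro s hs
    obtain ⟨u, hu, rfl⟩ := List.mem_map.mp hs
    have := hb u hu
    rw [PySem.Str.len_eq] at this
    omega
  · intro s hs
    obtain ⟨u, hu, rfl⟩ := List.mem_map.mp hs
    exact List.le_sum_of_mem (List.mem_map_of_mem hs)
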